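-- pv_equiv track=rewrite | github.com/mattthewong/cs_5_green | finalStrains/amplicons.py | blockPrimers
-- ===== SOURCE A (Python) =====
-- def containsCandidateRegion(blockL, start, end):
--     '''Takes an alignment block as input. It evaluates whether
--     the given region, which is inputed by the start and end
--     of the region, that is to be evaluated is identical
--     in all strains'''
--
--     for i in range(len(blockL)):
--         for j in range(len(blockL)):
--             if blockL[i][start:end]!=blockL[j][start:end]:
--                 return False
--     return True
--
-- def extendCandidateRegion(blockL, start, end):
--     '''Takes an alignment block as input. Uses containsCandidateRegion
--     to evaluate whether the given start and end region is identical
--     in all strains. If so, it extends the end of the region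
--     to find the longest possible identical region with the given
--     start point, and returns the new endpoint'''
--     newEnd=end
--     test=containsCandidateRegion(blockL, start, end)
--     while test==True:
--         if newEnd+1==len(blockL[0])+1:
--             test=False
--         elif containsCandidateRegion(blockL, start, newEnd+1)==True:
--             newEnd+=1
--             test=containsCandidateRegion(blockL, start, newEnd+1)
--         else:
--             test=False
--     return newEnd
--
-- def blockPrimers(blockL, minPrimerSiteSize):
--     '''Takes an alignment block as input. Within this block it
--     finds candidate regions, which consist of minPrimerSiteSize bases
--     in a row that are identical in all strains, where a primer could bind.
--     Each putative primer site is recorded in a tuple like this: (start,end).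
--     The function returns a list of such tuples.'''
--
--     tupleList=[]
--     i=0
--     while i <=len(blockL[0])-minPrimerSiteSize:
--         if containsCandidateRegion(blockL, i, i+minPrimerSiteSize)==True:
--             newEnd=extendCandidateRegion(blockL, i, i+minPrimerSiteSize)
--             tupleList.append((i,newEnd))
--             i+=newEnd-i
--         else:
--             i+=1
--     return tupleList
-- ===== SOURCE B (Python) =====
-- def blockPrimers(blockL, minPrimerSiteSize):
--     '''Precompute, for each column of the first strain, whether all strains are
--     identical at that column (same presence and same base); then emit one tuple
--     per maximal run of identical columns whose length is >= minPrimerSiteSize.'''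
--     L = len(blockL[0])
--     s0 = blockL[0]
--     eq = []
--     for j in range(L):
--         c0 = s0[j] if j < len(s0) else None
--         eq.append(all((s[j] if j < len(s) else None) == c0 for s in blockL))
--     tupleList = []
--     j = 0
--     while j < L:
--         if eq[j]:
--             b = j + 1
--             while b < L and eq[b]:
--                 b += 1
--             if b - j >= minPrimerSiteSize:
--                 tupleList.append((j, b))
--             j = b
--         else:
--             j += 1
--     return tupleList
-- ===== Notes on version B (the rewrite author's own statement) =====
-- stated objective: alternative
-- what changed: Instead of re-comparing all pairs of strain slices for every window position and re-verifying whole prefixes while extending, B precomputes one boolean per column (all strains identical there) and emits each maximal run of identical columns of length >= minPrimerSiteSize in a single scan.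
import Mathlib
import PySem

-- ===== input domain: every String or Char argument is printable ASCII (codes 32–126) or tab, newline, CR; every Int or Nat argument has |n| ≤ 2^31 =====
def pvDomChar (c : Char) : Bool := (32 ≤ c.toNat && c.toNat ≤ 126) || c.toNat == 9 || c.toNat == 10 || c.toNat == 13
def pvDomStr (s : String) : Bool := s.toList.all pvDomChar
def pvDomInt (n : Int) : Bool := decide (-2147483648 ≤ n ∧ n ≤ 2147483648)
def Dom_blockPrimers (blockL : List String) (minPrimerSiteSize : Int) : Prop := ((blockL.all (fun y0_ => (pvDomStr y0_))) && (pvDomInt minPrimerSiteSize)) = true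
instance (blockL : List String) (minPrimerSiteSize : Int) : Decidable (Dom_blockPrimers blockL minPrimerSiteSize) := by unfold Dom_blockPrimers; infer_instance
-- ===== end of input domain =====

/- B replaces A's repeated pairwise window/extension slice comparisons by a precomputed
   per-column all-strains-identical flag and a single scan over maximal runs (objective: alternative). -/



-- ===== PORT A =====
-- string slices are taken on the code-point list (PySem.Chars.slice_eq_listSlice: exact for str[a:b])
def containsCandidateRegion (blockL : List String) (start stop : Int) : Bool :=
  (List.range blockL.length).all fun i =>
    (List.range blockL.length).all fun j =>
      decide (PySem.List.slice (blockL.getD i "").toList (some start) (some stop)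
            = PySem.List.slice (blockL.getD j "").toList (some start) (some stop))

def extendLoop (blockL : List String) (start L : Int) : Nat → Int → Bool → Int
  | 0, newEnd, _ => newEnd
  | fuel+1, newEnd, test =>
    if test then
      if newEnd + 1 = L + 1 then extendLoop blockL start L fuel newEnd false
      else if containsCandidateRegion blockL start (newEnd + 1) then
        extendLoop blockL start L fuel (newEnd + 1) (containsCandidateRegion blockL start (newEnd + 2))
      else extendLoop blockL start L fuel newEnd false
    else newEnd

def extendCandidateRegion (blockL : List String) (start stop : Int) : Int :=
  let L : Int := ((blockL.getD 0 "").toList.length : Int)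
  extendLoop blockL start L ((L - stop).toNat + 2) stop (containsCandidateRegion blockL start stop)

def mainLoop (blockL : List String) (m L : Int) : Nat → Int → List (Int × Int) → List (Int × Int)
  | 0, _, acc => acc
  | fuel+1, i, acc =>
    if i ≤ L - m then
      if containsCandidateRegion blockL i (i + m) then
        let newEnd := extendCandidateRegion blockL i (i + m)
        mainLoop blockL m L fuel newEnd (acc ++ [(i, newEnd)])
      else mainLoop blockL m L fuel (i + 1) acc
    else acc

def blockPrimers (blockL : List String) (minPrimerSiteSize : Int) : List (Int × Int) :=
  let L : Int := ((blockL.getD 0 "").toList.length : Int)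
  mainLoop blockL minPrimerSiteSize L (L.toNat + 1) 0 []

-- ===== PORT B =====
def colEq (blockL : List String) (j : Nat) : Bool :=
  let s0 := blockL.getD 0 ""
  blockL.all fun s => s.toList[j]? == s0.toList[j]?

def advanceB (eq : List Bool) (L : Nat) (b : Nat) : Nat :=
  if h : b < L ∧ eq.getD b false then advanceB eq L (b + 1) else b
termination_by L - b
decreasing_by omega

theorem le_advanceB (eq : List Bool) (L b : Nat) : b ≤ advanceB eq L b := by
  rw [advanceB]
  split
  · exact le_trans (Nat.le_succ b) (le_advanceB eq L (b + 1))
  · exact le_refl b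
termination_by L - b
decreasing_by omega

def scanB (eq : List Bool) (L : Nat) (m : Int) (j : Nat) (acc : List (Int × Int)) : List (Int × Int) :=
  if h : j < L then
    if eq.getD j false then
      let b := advanceB eq L (j + 1)
      scanB eq L m b (if m ≤ (b : Int) - (j : Int) then acc ++ [((j : Int), (b : Int))] else acc)
    else scanB eq L m (j + 1) acc
  else acc
termination_by L - j
decreasing_by
  · have := le_advanceB eq L (j + 1); omega
  · omega

def blockPrimers_alt (blockL : List String) (minPrimerSiteSize : Int) : List (Int × Int) :=
  let L := (blockL.getD 0 "").toList.length
  let eq := (List.range L).map (colEq blockL)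
  scanB eq L minPrimerSiteSize 0 []

-- ===== PRECONDITION & SPEC =====
-- Pre_ excludes exactly the inputs where the Python A does not return: blockL = [] (IndexError on
-- blockL[0]) and minPrimerSiteSize ≤ 0 (the main loop can never reach i > len(blockL[0]) - minPrimerSiteSize
-- because i always stays ≤ len(blockL[0]), so A loops forever).
def Pre_blockPrimers (blockL : List String) (minPrimerSiteSize : Int) : Prop :=
  blockL ≠ [] ∧ 1 ≤ minPrimerSiteSize
instance (blockL : List String) (minPrimerSiteSize : Int) : Decidable (Pre_blockPrimers blockL minPrimerSiteSize) := by unfold Pre_blockPrimers; infer_instance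
def pvWitness_blockPrimers : List String × Int := (["acgt", "acgt"], 2)

def Spec_blockPrimers (blockL : List String) (minPrimerSiteSize : Int) (out : List (Int × Int)) : Prop := out = blockPrimers_alt blockL minPrimerSiteSize
instance (blockL : List String) (minPrimerSiteSize : Int) (out : List (Int × Int)) : Decidable (Spec_blockPrimers blockL minPrimerSiteSize out) := by unfold Spec_blockPrimers; infer_instance

-- ===== CLAIM (what is proved, stated in full; the proofs are below) =====
def Claim_equal_blockPrimers : Prop := ∀ (blockL : List String) (minPrimerSiteSize : Int), Dom_blockPrimers blockL minPrimerSiteSize → Pre_blockPrimers blockL minPrimerSiteSize → Spec_blockPrimers blockL minPrimerSiteSize (blockPrimers blockL minPrimerSiteSize)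

-- ===== LEMMAS AND PROOFS =====



theorem slice_eq_iff (l l' : List Char) (s e : Nat) :
    (PySem.List.slice l (some (s:Int)) (some (e:Int)) = PySem.List.slice l' (some (s:Int)) (some (e:Int)))
    ↔ ∀ j : Nat, s ≤ j → j < e → l[j]? = l'[j]? := by
  rw [PySem.List.slice_natCast, PySem.List.slice_natCast]
  constructor
  · intro h j hs hj
    have h2 := congrArg (fun t => t[j - s]?) h
    simp only [List.getElem?_take, List.getElem?_drop] at h2
    rw [if_pos (by omega), if_pos (by omega)] at h2
    rwa [Nat.add_sub_cancel' hs] at h2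
  · intro h
    apply List.ext_getElem?
    intro k
    simp only [List.getElem?_take, List.getElem?_drop]
    split
    · exact h (s + k) (by omega) (by omega)
    · rfl

theorem contains_iff (bl : List String) (s e : Nat) :
    (containsCandidateRegion bl (s:Int) (e:Int) = true) ↔
    ∀ j : Nat, s ≤ j → j < e → colEq bl j = true := by
  unfold containsCandidateRegion colEq
  simp only [List.all_eq_true, List.mem_range, decide_eq_true_iff, beq_iff_eq, slice_eq_iff]
  constructor
  · intro h j hs hj x hx
    obtain ⟨i, hi, rfl⟩ := List.mem_iff_getElem.mp hx
    have h0 : 0 < bl.length := by omega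
    rw [List.getD_eq_getElem bl "" h0]
    have := h i hi 0 h0 j hs hj
    rwa [List.getD_eq_getElem bl "" hi, List.getD_eq_getElem bl "" h0] at this
  · intro h i hi k hk j hs hj
    rw [List.getD_eq_getElem bl "" hi, List.getD_eq_getElem bl "" hk]
    have hi' := h j hs hj _ (List.getElem_mem hi)
    have hk' := h j hs hj _ (List.getElem_mem hk)
    rw [hi', hk']

theorem advanceB_stop (eq : List Bool) (L b : Nat) (h : ¬ (b < L ∧ eq.getD b false = true)) :
    advanceB eq L b = b := by
  rw [advanceB, dif_neg h]

theorem advanceB_step (eq : List Bool) (L b : Nat) (h1 : b < L) (h2 : eq.getD b false = true) :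
    advanceB eq L b = advanceB eq L (b + 1) := by
  rw [advanceB, dif_pos ⟨h1, h2⟩]

theorem advanceB_le (eq : List Bool) (L b : Nat) (hb : b ≤ L) : advanceB eq L b ≤ L := by
  rw [advanceB]
  split
  · next h => exact advanceB_le eq L (b + 1) h.1
  · exact hb
termination_by L - b
decreasing_by omega

theorem advanceB_run (eq : List Bool) (L b k : Nat) (h1 : b ≤ k) (h2 : k < advanceB eq L b) :
    k < L ∧ eq.getD k false = true := by
  by_cases h : b < L ∧ eq.getD b false = true
  · rcases Nat.eq_or_lt_of_le h1 with rfl | hlt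
    · exact h
    · rw [advanceB, dif_pos h] at h2
      exact advanceB_run eq L (b + 1) k hlt h2
  · rw [advanceB, dif_neg h] at h2; omega
termination_by L - b
decreasing_by omega

theorem advanceB_le_of_false (eq : List Bool) (L b f : Nat) (h1 : b ≤ f)
    (h2 : ¬ (f < L ∧ eq.getD f false = true)) : advanceB eq L b ≤ f := by
  rw [advanceB]
  split
  · next h =>
    have hbf : b ≠ f := by rintro rfl; exact h2 h
    exact advanceB_le_of_false eq L (b + 1) f (by omega) h2
  · exact h1
termination_by L - b
decreasing_by omega

theorem advanceB_congr (eq : List Bool) (L c d : Nat) (hcd : c ≤ d)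
    (h : ∀ k, c ≤ k → k < d → k < L ∧ eq.getD k false = true) :
    advanceB eq L c = advanceB eq L d := by
  rcases Nat.eq_or_lt_of_le hcd with rfl | hlt
  · rfl
  · have hc := h c le_rfl hlt
    rw [advanceB_step eq L c hc.1 hc.2]
    exact advanceB_congr eq L (c + 1) d hlt (fun k hk1 hk2 => h k (by omega) hk2)
termination_by d - c
decreasing_by omega

theorem scanB_tail (eq : List Bool) (L : Nat) (m : Int) (j : Nat) (acc : List (Int × Int))
    (h : (L : Int) - (j : Int) < m) : scanB eq L m j acc = acc := by
  rw [scanB]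
  split
  · next hj =>
    split
    · next he =>
      have hb1 := le_advanceB eq L (j + 1)
      have hb2 := advanceB_le eq L (j + 1) hj
      show scanB eq L m (advanceB eq L (j + 1))
        (if m ≤ ((advanceB eq L (j + 1) : Int)) - (j : Int) then acc ++ [((j : Int), ((advanceB eq L (j + 1) : Nat) : Int))] else acc) = acc
      rw [if_neg (by omega)]
      exact scanB_tail eq L m (advanceB eq L (j + 1)) acc (by omega)
    · exact scanB_tail eq L m (j + 1) acc (by omega)
  · rfl
termination_by L - j
decreasing_by
  · have := le_advanceB eq L (j + 1); omega
  · omega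

theorem scanB_jump (eq : List Bool) (L : Nat) (m : Int) (c : Nat) (acc : List (Int × Int))
    (hc : c < L) (he : eq.getD c false = true)
    (hshort : (advanceB eq L (c + 1) : Int) - (c : Int) < m) :
    scanB eq L m c acc = scanB eq L m (advanceB eq L (c + 1)) acc := by
  rw [scanB, dif_pos hc, if_pos he]
  show scanB eq L m (advanceB eq L (c + 1))
    (if m ≤ ((advanceB eq L (c + 1) : Int)) - (c : Int) then acc ++ [((c : Int), ((advanceB eq L (c + 1) : Nat) : Int))] else acc) = _
  rw [if_neg (by omega)]

theorem extendLoop_false (bl : List String) (s L : Int) (fuel : Nat) (ne : Int) :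
    extendLoop bl s L fuel ne false = ne := by
  cases fuel <;> simp [extendLoop]

theorem extendLoop_eq (bl : List String) (eq : List Bool) (LN : Nat)
    (heq : ∀ j : Nat, j < LN → eq.getD j false = colEq bl j) (i : Nat)
    (fuel : Nat) (ne : Nat) (test : Bool)
    (hfuel : LN - ne + 2 ≤ fuel) (hine : i ≤ ne) (hne : ne ≤ LN)
    (hinv : ∀ k, i ≤ k → k < ne → colEq bl k = true) :
    extendLoop bl (i : Int) (LN : Int) fuel (ne : Int) test
      = if test then ((advanceB eq LN ne : Nat) : Int) else (ne : Int) := by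
  cases fuel with
  | zero => omega
  | succ fuel =>
    cases test with
    | false => simp [extendLoop]
    | true =>
      simp only [extendLoop, if_pos]
      by_cases hL : ne = LN
      · subst hL
        rw [if_pos rfl, extendLoop_false, advanceB_stop eq ne ne (by omega)]
      · have hltL : ne < LN := by omega
        rw [if_neg (by omega)]
        have hcast1 : (ne : Int) + 1 = ((ne + 1 : Nat) : Int) := by push_cast; ring
        have hcast2 : (ne : Int) + 2 = ((ne + 2 : Nat) : Int) := by push_cast; ring
        rw [hcast1, hcast2]
        by_cases hcn : containsCandidateRegion bl (i : Int) ((ne + 1 : Nat) : Int) = true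
        · rw [if_pos hcn]
          have hinv' : ∀ k, i ≤ k → k < ne + 1 → colEq bl k = true :=
            (contains_iff bl i (ne + 1)).mp hcn
          have hstep : advanceB eq LN ne = advanceB eq LN (ne + 1) :=
            advanceB_step eq LN ne hltL (by rw [heq ne hltL]; exact hinv' ne hine (by omega))
          rw [extendLoop_eq bl eq LN heq i fuel (ne + 1)
                (containsCandidateRegion bl (i : Int) ((ne + 2 : Nat) : Int))
                (by omega) (by omega) (by omega) hinv']
          by_cases ht' : containsCandidateRegion bl (i : Int) ((ne + 2 : Nat) : Int) = true
          · rw [if_pos ht', hstep]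
          · rw [if_neg ht', hstep]
            have hstop : ¬ (ne + 1 < LN ∧ eq.getD (ne + 1) false = true) := by
              rintro ⟨h1, h2⟩
              apply ht'
              apply (contains_iff bl i (ne + 2)).mpr
              intro k hk1 hk2
              rcases Nat.lt_or_ge k (ne + 1) with hk | hk
              · exact hinv' k hk1 hk
              · have : k = ne + 1 := by omega
                subst this
                rw [← heq (ne + 1) h1]; exact h2
            rw [advanceB_stop eq LN (ne + 1) hstop]
        · rw [if_neg hcn, extendLoop_false]
          have hcolne : colEq bl ne = false := by
            by_contra hcc
            apply hcn
            apply (contains_iff bl i (ne + 1)).mpr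
            intro k hk1 hk2
            rcases Nat.lt_or_ge k ne with hk | hk
            · exact hinv k hk1 hk
            · have : k = ne := by omega
              subst this
              simpa using hcc
          rw [advanceB_stop eq LN ne (by rw [heq ne hltL, hcolne]; simp)]

theorem extend_eq (bl : List String) (eq : List Bool)
    (heq : ∀ j : Nat, j < (bl.getD 0 "").toList.length → eq.getD j false = colEq bl j)
    (i em : Nat) (hie : i ≤ em) (hem : em ≤ (bl.getD 0 "").toList.length)
    (hall : ∀ k, i ≤ k → k < em → colEq bl k = true) :
    extendCandidateRegion bl (i : Int) (em : Int)
      = ((advanceB eq (bl.getD 0 "").toList.length em : Nat) : Int) := by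
  show extendLoop bl (i : Int) ((bl.getD 0 "").toList.length : Int)
      ((((bl.getD 0 "").toList.length : Int) - (em : Int)).toNat + 2) (em : Int)
      (containsCandidateRegion bl (i : Int) (em : Int))
      = ((advanceB eq (bl.getD 0 "").toList.length em : Nat) : Int)
  have hto : (((bl.getD 0 "").toList.length : Int) - (em : Int)).toNat
      = (bl.getD 0 "").toList.length - em := by omega
  rw [hto, extendLoop_eq bl eq _ heq i _ em _ (by omega) hie hem hall,
    if_pos ((contains_iff bl i em).mpr hall)]

theorem main_eq (bl : List String) (m : Int) (hm : 1 ≤ m) (eq : List Bool)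
    (heq : ∀ j : Nat, j < (bl.getD 0 "").toList.length → eq.getD j false = colEq bl j)
    (fuel : Nat) (i : Nat) (acc : List (Int × Int))
    (hfuel : (bl.getD 0 "").toList.length - i < fuel) :
    mainLoop bl m ((bl.getD 0 "").toList.length : Int) fuel (i : Int) acc
      = scanB eq (bl.getD 0 "").toList.length m i acc := by
  cases fuel with
  | zero => omega
  | succ fuel =>
    set LN := (bl.getD 0 "").toList.length with hLN
    by_cases hcond : (i : Int) ≤ (LN : Int) - m
    · have him : i + m.toNat ≤ LN := by omega
      have hiL : i < LN := by omega
      have hcastm : (i : Int) + m = ((i + m.toNat : Nat) : Int) := by omega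
      simp only [mainLoop]
      rw [if_pos hcond, hcastm]
      by_cases hc : containsCandidateRegion bl (i : Int) ((i + m.toNat : Nat) : Int) = true
      · rw [if_pos hc]
        have hall := (contains_iff bl i (i + m.toNat)).mp hc
        rw [extend_eq bl eq heq i (i + m.toNat) (by omega) him hall]
        have hb1 : i + m.toNat ≤ advanceB eq LN (i + m.toNat) := le_advanceB eq LN _
        have hb2 : advanceB eq LN (i + m.toNat) ≤ LN := advanceB_le eq LN _ him
        have hadv : advanceB eq LN (i + 1) = advanceB eq LN (i + m.toNat) :=
          advanceB_congr eq LN (i + 1) (i + m.toNat) (by omega)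
            (fun k hk1 hk2 => ⟨by omega, by rw [heq k (by omega)]; exact hall k (by omega) hk2⟩)
        conv_rhs => rw [scanB]
        rw [dif_pos hiL, if_pos (by rw [heq i hiL]; exact hall i le_rfl (by omega))]
        show _ = scanB eq LN m (advanceB eq LN (i + 1))
            (if m ≤ ((advanceB eq LN (i + 1) : Nat) : Int) - ((i : Nat) : Int)
             then acc ++ [(((i : Nat) : Int), ((advanceB eq LN (i + 1) : Nat) : Int))] else acc)
        rw [hadv, if_pos (by omega)]
        exact main_eq bl m hm eq heq fuel (advanceB eq LN (i + m.toNat))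
          (acc ++ [(((i : Nat) : Int), ((advanceB eq LN (i + m.toNat) : Nat) : Int))]) (by omega)
      · rw [if_neg hc]
        have hcast1 : (i : Int) + 1 = ((i + 1 : Nat) : Int) := by push_cast; ring
        rw [hcast1, main_eq bl m hm eq heq fuel (i + 1) acc (by omega)]
        by_cases hcol : colEq bl i = true
        · obtain ⟨j0, hj01, hj02, hj03⟩ : ∃ j0, i ≤ j0 ∧ j0 < i + m.toNat ∧ colEq bl j0 = false := by
            by_contra hno
            push Not at hno
            exact hc ((contains_iff bl i (i + m.toNat)).mpr
              (fun k h1 h2 => by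
                by_contra hF
                simp only [Bool.not_eq_true] at hF
                exact (hno k h1 h2) hF))
          have hstopj0 : ¬ (j0 < LN ∧ eq.getD j0 false = true) := by
            rintro ⟨h1, h2⟩
            rw [heq j0 h1, hj03] at h2
            simp at h2
          have hble : advanceB eq LN (i + 1) ≤ j0 :=
            advanceB_le_of_false eq LN (i + 1) j0
              (by rcases Nat.eq_or_lt_of_le hj01 with rfl | h
                  · rw [hcol] at hj03; simp at hj03
                  · omega) hstopj0
          have hshort : ((advanceB eq LN (i + 1) : Nat) : Int) - ((i : Nat) : Int) < m := by omega
          rw [scanB_jump eq LN m i acc hiL (by rw [heq i hiL]; exact hcol) hshort]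
          rcases Nat.eq_or_lt_of_le (le_advanceB eq LN (i + 1)) with hEq | hlt
          · rw [← hEq]
          · obtain ⟨h1iL, heqv⟩ := advanceB_run eq LN (i + 1) (i + 1) le_rfl hlt
            have hstep := advanceB_step eq LN (i + 1) h1iL heqv
            rw [scanB_jump eq LN m (i + 1) acc h1iL heqv (by rw [← hstep]; omega), ← hstep]
        · conv_rhs => rw [scanB]
          rw [dif_pos hiL,
            if_neg (by rw [heq i hiL]; simpa using hcol)]
    · simp only [mainLoop]
      rw [if_neg hcond, scanB_tail eq LN m i acc (by omega)]
termination_by fuel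

-- (verdict proved just below)
theorem blockPrimers_spec : Claim_equal_blockPrimers := by
  intro bl m _hdom hpre
  unfold Spec_blockPrimers
  obtain ⟨-, hm⟩ := hpre
  unfold blockPrimers blockPrimers_alt
  show mainLoop bl m ((bl.getD 0 "").toList.length : Int)
      (((bl.getD 0 "").toList.length : Int).toNat + 1) 0 []
    = scanB ((List.range (bl.getD 0 "").toList.length).map (colEq bl))
        (bl.getD 0 "").toList.length m 0 []
  rw [Int.toNat_natCast, show (0 : Int) = ((0 : Nat) : Int) by simp]
  exact main_eq bl m hm _ (fun j hj => by simp only [List.getD, List.getElem?_map]; rw [List.getElem?_range (by simpa using hj)]; rfl) _ 0 [] (by omega)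

-- ===== VERDICT (by name: the statement is the Claim_ definition above) =====
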